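-- pv_equiv track=rewrite | github.com/kyungjinleelee/Algorithm | 프로그래머스/2/131127. 할인 행사/할인 행사.py | solution
-- ===== SOURCE A (Python) =====
-- def solution(want, number, discount):
--     dic = {}
--     answer = 0
--
--     for i in range(len(want)):
--         #사야할 품목과 그 갯수를 각각 key와 value로 딕셔너리 형성
--         dic[want[i]] = number[i]
--     i = 0
--     #discount의 원소를 10개씩 묶어 열흘동안 할인하는 목록 형성
--     while i <= len(discount) - 10 :
--         shop = discount[i: i+10]
--         con = True
--
--         #열흘 중 사야할 품목이 할인하는 날의 수와 구매해야 할 수가 다르면 실행 종료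
--         for j in want:
--             if shop.count(j) == dic[j]:
--                 continue
--             else:
--                 con = False
--                 break
--
--         #열흘 중 사야할 품목이 할인하는 날의 수와 구매해야 할 수가 모두 같으므로 answer 1 증가
--         if con:
--             answer += 1
--         i += 1
--     return answer
-- ===== SOURCE B (Python) =====
-- def _update(cnt, need, matches, item, delta):
--     # shift the window by one occurrence of item; keep the matched-key count in step
--     if item in cnt:
--         if cnt[item] == need[item]:
--             matches -= 1
--         cnt[item] += delta
--         if cnt[item] == need[item]:
--             matches += 1
--     return matches
--
-- def solution(want, number, discount):
--     need = {}
--     for w, n in zip(want, number):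
--         need[w] = n
--     if len(discount) < 10:
--         return 0
--     cnt = {}
--     for k in need:
--         cnt[k] = 0
--     for item in discount[:10]:
--         if item in cnt:
--             cnt[item] += 1
--     matches = 0
--     for k in need:
--         if cnt[k] == need[k]:
--             matches += 1
--     answer = 1 if matches == len(need) else 0
--     for i in range(10, len(discount)):
--         matches = _update(cnt, need, matches, discount[i], 1)
--         matches = _update(cnt, need, matches, discount[i - 10], -1)
--         if matches == len(need):
--             answer += 1
--     return answer
-- ===== Notes on version B (the rewrite author's own statement) =====
-- stated objective: alternative
-- what changed: A re-slices discount and recounts every wanted item inside each 10-day window; B slides the window one day at a time, updating a counter dict and a running matched-key count incrementally, with no slicing or recounting (O(n + |want|) operations vs A's per-window rescans, though not measurably faster in CPython, where A's slice/count run in C).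
import Mathlib
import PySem

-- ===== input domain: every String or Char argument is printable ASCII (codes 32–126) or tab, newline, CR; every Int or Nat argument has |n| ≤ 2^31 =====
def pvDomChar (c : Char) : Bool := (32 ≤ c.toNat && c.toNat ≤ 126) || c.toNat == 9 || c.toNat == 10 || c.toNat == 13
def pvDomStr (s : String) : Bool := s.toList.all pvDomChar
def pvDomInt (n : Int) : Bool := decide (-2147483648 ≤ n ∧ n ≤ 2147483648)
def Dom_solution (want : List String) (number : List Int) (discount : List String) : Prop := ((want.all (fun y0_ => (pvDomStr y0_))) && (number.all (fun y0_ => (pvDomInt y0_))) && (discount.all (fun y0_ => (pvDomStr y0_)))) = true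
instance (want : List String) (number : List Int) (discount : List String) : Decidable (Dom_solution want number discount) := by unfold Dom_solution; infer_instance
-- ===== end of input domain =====

-- B replaces A's per-window slice-and-recount scan by a sliding-window counter with incremental add/remove and a running matched-key count: a different algorithm (A mutates nothing; return values only).

-- ===== PORT A =====
def solution (want : List String) (number : List Int) (discount : List String) : Int :=
  let dic := (PySem.List.pyRange 0 (want.length : Int) 1).foldl
      (fun (d : PySem.Dict String Int) i =>
        d.insert (PySem.List.pyGetD want i "") (PySem.List.pyGetD number i 0)) PySem.Dict.empty
  (PySem.List.pyRange 0 ((discount.length : Int) - 10 + 1) 1).foldl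
    (fun answer i =>
      let shop := PySem.List.slice discount (some i) (some (i + 10))
      let con := want.all (fun j => ((PySem.List.count shop j : Int) == dic.getD j 0))
      if con then answer + 1 else answer) 0

-- ===== PORT B =====
-- port of Source B's _update (cnt is mutated in place in Python, so the Lean helper returns the pair)
def slideUpdate (cnt need : PySem.Dict String Int) (mtc : Int) (item : String) (delta : Int) :
    PySem.Dict String Int × Int :=
  if cnt.contains item then
    let m1 := if cnt.getD item 0 == need.getD item 0 then mtc - 1 else mtc
    let cnt' := cnt.insert item (cnt.getD item 0 + delta)
    let m2 := if cnt'.getD item 0 == need.getD item 0 then m1 + 1 else m1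
    (cnt', m2)
  else (cnt, mtc)

def solution_alt (want : List String) (number : List Int) (discount : List String) : Int :=
  let need := (want.zip number).foldl
      (fun (d : PySem.Dict String Int) p => d.insert p.1 p.2) PySem.Dict.empty
  if discount.length < 10 then 0 else
  let cnt0 := need.keys.foldl (fun (d : PySem.Dict String Int) k => d.insert k 0) PySem.Dict.empty
  let cnt1 := (PySem.List.slice discount none (some 10)).foldl
      (fun (d : PySem.Dict String Int) item =>
        if d.contains item then d.insert item (d.getD item 0 + 1) else d) cnt0
  let matches0 := need.keys.foldl
      (fun (m : Int) k => if cnt1.getD k 0 == need.getD k 0 then m + 1 else m) 0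
  let answer0 : Int := if matches0 == (need.size : Int) then 1 else 0
  ((PySem.List.pyRange 10 (discount.length : Int) 1).foldl
    (fun (st : (PySem.Dict String Int × Int) × Int) i =>
      let r1 := slideUpdate st.1.1 need st.1.2 (PySem.List.pyGetD discount i "") 1
      let r2 := slideUpdate r1.1 need r1.2 (PySem.List.pyGetD discount (i - 10) "") (-1)
      (r2, if r2.2 == (need.size : Int) then st.2 + 1 else st.2)) ((cnt1, matches0), answer0)).2

-- ===== PRECONDITION & SPEC =====
-- Pre_ excludes exactly the inputs on which A raises IndexError: number shorter than want (A reads number[i] at every index of want).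
def Pre_solution (want : List String) (number : List Int) (discount : List String) : Prop :=
  want.length ≤ number.length
instance (want : List String) (number : List Int) (discount : List String) : Decidable (Pre_solution want number discount) := by unfold Pre_solution; infer_instance
def pvWitness_solution : List String × List Int × List String :=
  (["a"], [2], ["a", "b", "a", "c", "a", "b", "c", "a", "b", "b"])

def Spec_solution (want : List String) (number : List Int) (discount : List String) (out : Int) : Prop := out = solution_alt want number discount
instance (want : List String) (number : List Int) (discount : List String) (out : Int) : Decidable (Spec_solution want number discount out) := by unfold Spec_solution; infer_instance

-- ===== CLAIM (what is proved, stated in full; the proofs are below) =====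
def Claim_equal_solution : Prop := ∀ (want : List String) (number : List Int) (discount : List String), Dom_solution want number discount → Pre_solution want number discount → Spec_solution want number discount (solution want number discount)

-- ===== LEMMAS AND PROOFS =====

-- Wc discount s k = how often k is discounted in the 10-day window starting on day s
def Wc (discount : List String) (s : Nat) (k : String) : Int :=
  (((discount.drop s).take 10).count k : Int)

-- goodB: the window starting on day s discounts every wanted item exactly the wanted number of times
def goodB (need : PySem.Dict String Int) (discount : List String) (s : Nat) : Bool :=
  need.keys.all (fun k => Wc discount s k == need.getD k 0)

-- A's index loop builds the same dictionary as B's zip loop (given want.length ≤ number.length).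
lemma dic_eq_need (want : List String) (number : List Int) (h : want.length ≤ number.length) :
    (PySem.List.pyRange 0 (want.length : Int) 1).foldl
      (fun (d : PySem.Dict String Int) i =>
        d.insert (PySem.List.pyGetD want i "") (PySem.List.pyGetD number i 0)) PySem.Dict.empty
    = (want.zip number).foldl
      (fun (d : PySem.Dict String Int) p => d.insert p.1 p.2) PySem.Dict.empty := by
  have hz : (want.zip number).length = want.length := by
    simp [List.length_zip]; omega
  rw [← PySem.List.foldl_pyRange_zero_pyGetD' (want.zip number) ("", 0)
      (fun (d : PySem.Dict String Int) p => d.insert p.1 p.2) PySem.Dict.empty, hz]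
  apply PySem.List.foldl_congr_mem
  intro d i hi
  rcases PySem.List.mem_pyRange_one.1 hi with ⟨h0, h1⟩
  have hw : i < (want.length : Int) := h1
  have hn : i < (number.length : Int) := by omega
  have hzl : i < ((want.zip number).length : Int) := by rw [hz]; exact h1
  rw [PySem.List.pyGetD_eq_getElem _ _ h0 hw, PySem.List.pyGetD_eq_getElem _ _ h0 hn,
      PySem.List.pyGetD_eq_getElem _ _ h0 hzl]
  simp [List.getElem_zip]

-- changing a predicate at one key of a duplicate-free list shifts its countP by the two indicator values
lemma countP_change {α : Type} [DecidableEq α] :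
    ∀ (K : List α), K.Nodup → ∀ x ∈ K, ∀ (p q : α → Bool), (∀ k ∈ K, k ≠ x → p k = q k) →
    (K.countP q : Int) = (K.countP p : Int) - (if p x then 1 else 0) + (if q x then 1 else 0) := by
  intro K
  induction K with
  | nil => intro _ x hx; simp at hx
  | cons a t ih =>
    intro hnd x hx p q hagree
    rw [List.nodup_cons] at hnd
    obtain ⟨ha, ht⟩ := hnd
    rw [List.countP_cons, List.countP_cons]
    rcases List.mem_cons.1 hx with rfl | hxt
    · have hpq : List.countP p t = List.countP q t :=
        List.countP_congr (fun k hk => by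
          rw [hagree k (List.mem_cons_of_mem _ hk) (fun hh => ha (hh ▸ hk))])
      push_cast
      rw [hpq]
      split_ifs <;> omega
    · have hax : a ≠ x := fun hh => ha (hh ▸ hxt)
      have hpa : p a = q a := hagree a (List.mem_cons_self) hax
      have H := ih ht x hxt p q (fun k hk hkx => hagree k (List.mem_cons_of_mem _ hk) hkx)
      push_cast
      rw [H, hpa]
      split_ifs <;> omega

lemma size_keys (need : PySem.Dict String Int) : (need.size : Int) = (need.keys.length : Int) := by
  simp [PySem.Dict.size, PySem.Dict.keys]

-- sliding the window one day forward drops day m and gains day m+10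
lemma Wc_succ (discount : List String) (m : Nat) (h : m + 10 < discount.length) (k : String) :
    Wc discount (m+1) k = Wc discount m k
      - (if discount[m]'(by omega) == k then 1 else 0)
      + (if discount[m+10]'(h) == k then 1 else 0) := by
  unfold Wc
  have hd : discount.drop m = discount[m]'(by omega) :: discount.drop (m+1) :=
    List.drop_eq_getElem_cons (by omega)
  have h10 : (discount.drop (m+1)).take 10 = (discount.drop (m+1)).take 9 ++ [discount[m+10]'h] := by
    conv_lhs => rw [show (10 : Nat) = 9 + 1 from rfl, List.take_succ]
    congr 1
    rw [List.getElem?_drop]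
    simp [show m + 1 + 9 = m + 10 from by omega, h]
  rw [hd, h10]
  simp only [List.take_succ_cons, List.count_append, List.count_cons, List.count_nil]
  push_cast
  split_ifs <;> simp_all <;> omega

-- slideUpdate keeps the counter table and the matched-key count in step
lemma slideUpdate_spec (need cnt : PySem.Dict String Int) (mtc : Int) (item : String) (delta : Int)
    (f : String → Int) (hnd : need.keys.Nodup)
    (hitems : cnt.items = need.keys.map (fun k => (k, f k)))
    (hm : mtc = (need.keys.countP (fun k => f k == need.getD k 0) : Int)) :
    (slideUpdate cnt need mtc item delta).1.items
        = need.keys.map (fun k => (k, if k == item then f k + delta else f k))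
    ∧ (slideUpdate cnt need mtc item delta).2
        = (need.keys.countP (fun k => (if k == item then f k + delta else f k) == need.getD k 0) : Int) := by
  have hkeys : cnt.keys = need.keys := by
    show cnt.items.map Prod.fst = _
    rw [hitems]
    simp [List.map_map, Function.comp_def]
  unfold slideUpdate
  by_cases hc : cnt.contains item
  · have hmemK : item ∈ need.keys := hkeys ▸ (PySem.Dict.contains_iff_mem_keys _ _).1 hc
    have hcnd : cnt.keys.Nodup := by rw [hkeys]; exact hnd
    have hget : cnt.getD item 0 = f item :=
      PySem.Dict.getD_of_mem_items cnt (by rw [hitems]; exact List.mem_map_of_mem hmemK) hcnd 0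
    simp only [hc, if_true]
    constructor
    · rw [PySem.Dict.items_insert_of_contains _ _ hc, hitems, List.map_map]
      apply List.map_congr_left
      intro k hk
      by_cases hki : k = item
      · subst hki
        simp [hget]
      · simp [Function.comp_def, show (k == item) = false from by simpa using hki, hki]
    · rw [PySem.Dict.getD_insert_self, hget, hm]
      rw [countP_change need.keys hnd item hmemK
            (fun k => f k == need.getD k 0)
            (fun k => (if k == item then f k + delta else f k) == need.getD k 0)
            (by intro k _ hkx; simp [show (k == item) = false from by simpa using hkx])]
      simp only [BEq.rfl, if_true]
      split_ifs <;> omega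
  · simp only [hc, Bool.false_eq_true, if_false]
    have hni : item ∉ need.keys := fun hmem =>
      hc ((PySem.Dict.contains_iff_mem_keys _ _).2 (hkeys ▸ hmem))
    constructor
    · rw [hitems]
      apply List.map_congr_left
      intro k hk
      have : (k == item) = false := by
        simp only [beq_eq_false_iff_ne, ne_eq]
        intro hh; exact hni (hh ▸ hk)
      simp [this]
    · rw [hm]
      congr 1
      apply List.countP_congr
      intro k hk
      have : (k == item) = false := by
        simp only [beq_eq_false_iff_ne, ne_eq]
        intro hh; exact hni (hh ▸ hk)
      rw [this]
      simp

-- B's initial fill loop adds each processed day's counts to the counter table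
lemma fill_spec (need : PySem.Dict String Int) (hnd : need.keys.Nodup) :
    ∀ (l : List String) (cnt : PySem.Dict String Int) (f : String → Int),
    cnt.items = need.keys.map (fun k => (k, f k)) →
    (l.foldl (fun (d : PySem.Dict String Int) item =>
        if d.contains item then d.insert item (d.getD item 0 + 1) else d) cnt).items
    = need.keys.map (fun k => (k, f k + (l.count k : Int))) := by
  intro l
  induction l with
  | nil =>
    intro cnt f hitems
    rw [List.foldl_nil, hitems]
    apply List.map_congr_left
    intro k _
    simp
  | cons x t ih =>
    intro cnt f hitems
    rw [List.foldl_cons]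
    have hstep := slideUpdate_spec need cnt ((need.keys.countP (fun k => f k == need.getD k 0) : Int)) x 1 f hnd hitems rfl
    have hbody : (if cnt.contains x then cnt.insert x (cnt.getD x 0 + 1) else cnt)
        = (slideUpdate cnt need ((need.keys.countP (fun k => f k == need.getD k 0) : Int)) x 1).1 := by
      unfold slideUpdate
      by_cases hc : cnt.contains x <;> simp [hc]
    rw [hbody, ih _ _ hstep.1]
    apply List.map_congr_left
    intro k hk
    by_cases hki : k = x
    · subst hki
      simp [List.count_cons]
      ring
    · simp [show (k == x) = false from by simpa using hki,
            List.count_cons, show (x == k) = false from by simpa using (Ne.symm hki)]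

-- the loop invariant of B's sliding-window fold: counter table, matched-key count and window tally
lemma slide_loop (need : PySem.Dict String Int) (hnd : need.keys.Nodup)
    (discount : List String) (init : (PySem.Dict String Int × Int) × Int)
    (hc0 : init.1.1.items = need.keys.map (fun k => (k, Wc discount 0 k)))
    (hm0 : init.1.2 = (need.keys.countP (fun k => Wc discount 0 k == need.getD k 0) : Int))
    (ha0 : init.2 = (((List.range 1).countP (fun s => goodB need discount s)) : Int)) :
    ∀ (m : Nat), m + 10 ≤ discount.length →
    ((PySem.List.pyRange 10 ((10 + m : Nat) : Int) 1).foldl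
      (fun (st : (PySem.Dict String Int × Int) × Int) i =>
        let r1 := slideUpdate st.1.1 need st.1.2 (PySem.List.pyGetD discount i "") 1
        let r2 := slideUpdate r1.1 need r1.2 (PySem.List.pyGetD discount (i - 10) "") (-1)
        (r2, if r2.2 == (need.size : Int) then st.2 + 1 else st.2)) init).1.1.items
        = need.keys.map (fun k => (k, Wc discount m k))
    ∧ ((PySem.List.pyRange 10 ((10 + m : Nat) : Int) 1).foldl
      (fun (st : (PySem.Dict String Int × Int) × Int) i =>
        let r1 := slideUpdate st.1.1 need st.1.2 (PySem.List.pyGetD discount i "") 1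
        let r2 := slideUpdate r1.1 need r1.2 (PySem.List.pyGetD discount (i - 10) "") (-1)
        (r2, if r2.2 == (need.size : Int) then st.2 + 1 else st.2)) init).1.2
        = (need.keys.countP (fun k => Wc discount m k == need.getD k 0) : Int)
    ∧ ((PySem.List.pyRange 10 ((10 + m : Nat) : Int) 1).foldl
      (fun (st : (PySem.Dict String Int × Int) × Int) i =>
        let r1 := slideUpdate st.1.1 need st.1.2 (PySem.List.pyGetD discount i "") 1
        let r2 := slideUpdate r1.1 need r1.2 (PySem.List.pyGetD discount (i - 10) "") (-1)
        (r2, if r2.2 == (need.size : Int) then st.2 + 1 else st.2)) init).2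
        = (((List.range (m+1)).countP (fun s => goodB need discount s)) : Int) := by
  intro m
  induction m with
  | zero =>
    intro _
    rw [show ((10 + 0 : Nat) : Int) = 10 from by norm_num, PySem.List.pyRange_one_eq_nil (le_refl 10)]
    exact ⟨hc0, hm0, ha0⟩
  | succ m ih =>
    intro hle
    have ihm := ih (by omega)
    rw [show ((10 + (m+1) : Nat) : Int) = ((10 + m : Nat) : Int) + 1 from by push_cast; ring,
        PySem.List.pyRange_one_succ_right (by push_cast; omega), List.foldl_append, List.foldl_cons,
        List.foldl_nil]
    set prev := ((PySem.List.pyRange 10 ((10 + m : Nat) : Int) 1).foldl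
      (fun (st : (PySem.Dict String Int × Int) × Int) i =>
        let r1 := slideUpdate st.1.1 need st.1.2 (PySem.List.pyGetD discount i "") 1
        let r2 := slideUpdate r1.1 need r1.2 (PySem.List.pyGetD discount (i - 10) "") (-1)
        (r2, if r2.2 == (need.size : Int) then st.2 + 1 else st.2)) init) with hprev
    obtain ⟨ih1, ih2, ih3⟩ := ihm
    have hiadd : PySem.List.pyGetD discount ((10 + m : Nat) : Int) "" = discount[m+10]'(by omega) := by
      rw [show ((10 + m : Nat) : Int) = ((m + 10 : Nat) : Int) from by push_cast; ring]
      rw [PySem.List.pyGetD_eq_getElem _ _ (by positivity) (by exact_mod_cast by omega)]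
      simp only [Int.toNat_natCast]
    have hirem : PySem.List.pyGetD discount (((10 + m : Nat) : Int) - 10) "" = discount[m]'(by omega) := by
      rw [show ((10 + m : Nat) : Int) - 10 = ((m : Nat) : Int) from by push_cast; ring]
      rw [PySem.List.pyGetD_eq_getElem _ _ (by positivity) (by exact_mod_cast by omega)]
      simp only [Int.toNat_natCast]
    simp only [hiadd, hirem]
    have hs1 := slideUpdate_spec need prev.1.1 prev.1.2 (discount[m+10]'(by omega)) 1
      (Wc discount m) hnd ih1 ih2
    have hs2 := slideUpdate_spec need
      (slideUpdate prev.1.1 need prev.1.2 (discount[m+10]'(by omega)) 1).1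
      (slideUpdate prev.1.1 need prev.1.2 (discount[m+10]'(by omega)) 1).2
      (discount[m]'(by omega)) (-1)
      (fun k => if k == discount[m+10]'(by omega) then Wc discount m k + 1 else Wc discount m k)
      hnd hs1.1 hs1.2
    have hpt : ∀ k ∈ need.keys,
        (if k == discount[m]'(by omega) then
          (if k == discount[m+10]'(by omega) then Wc discount m k + 1 else Wc discount m k) + (-1)
         else (if k == discount[m+10]'(by omega) then Wc discount m k + 1 else Wc discount m k))
        = Wc discount (m+1) k := by
      intro k _
      rw [Wc_succ discount m (by omega) k]
      by_cases h1 : k = discount[m]'(by omega) <;> by_cases h2 : k = discount[m+10]'(by omega)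
      · subst h1
        simp [← h2]
      · subst h1
        simp [show (discount[m]'(by omega) == discount[m+10]'(by omega)) = false from by simpa using h2,
              show (discount[m+10]'(by omega) == discount[m]'(by omega)) = false from by
                simpa using (Ne.symm h2)]
        ring
      · subst h2
        simp [show (discount[m+10]'(by omega) == discount[m]'(by omega)) = false from by simpa using h1,
              show (discount[m]'(by omega) == discount[m+10]'(by omega)) = false from by
                simpa using (Ne.symm h1)]
      · simp [show (k == discount[m]'(by omega)) = false from by simpa using h1,
              show (k == discount[m+10]'(by omega)) = false from by simpa using h2,
              show (discount[m]'(by omega) == k) = false from by simpa using (Ne.symm h1),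
              show (discount[m+10]'(by omega) == k) = false from by simpa using (Ne.symm h2)]
    refine ⟨?_, ?_, ?_⟩
    · rw [hs2.1]
      apply List.map_congr_left
      intro k hk
      rw [hpt k hk]
    · rw [hs2.2]
      congr 1
      apply List.countP_congr
      intro k hk
      rw [hpt k hk]
    · rw [hs2.2, ih3]
      have hcnt2 : (need.keys.countP (fun k =>
          (if k == discount[m]'(by omega) then
            (if k == discount[m+10]'(by omega) then Wc discount m k + 1 else Wc discount m k) + (-1)
           else (if k == discount[m+10]'(by omega) then Wc discount m k + 1 else Wc discount m k))
          == need.getD k 0))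
          = need.keys.countP (fun k => Wc discount (m+1) k == need.getD k 0) := by
        apply List.countP_congr
        intro k hk
        rw [hpt k hk]
      rw [hcnt2]
      have hgood : ((((need.keys.countP (fun k => Wc discount (m+1) k == need.getD k 0)) : Int)
          == (need.size : Int)) : Bool) = goodB need discount (m+1) := by
        rw [Bool.eq_iff_iff]
        unfold goodB
        rw [beq_iff_eq, size_keys, Nat.cast_inj, List.all_eq_true]
        constructor
        · intro hlen k hk
          exact List.countP_eq_length.1 hlen k hk
        · intro hall
          exact List.countP_eq_length.2 hall
      rw [hgood]
      conv_rhs => rw [List.range_succ]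
      rw [List.countP_append]
      push_cast
      simp only [List.countP_cons, List.countP_nil]
      split_ifs with hg <;> push_cast [hg] <;> omega

-- ===== VERDICT (by name: the statement is the Claim_ definition above) =====
theorem solution_spec : Claim_equal_solution := by
  intro want number discount _ h
  unfold Spec_solution
  unfold Pre_solution at h
  unfold solution solution_alt
  simp only []
  rw [dic_eq_need want number h]
  set need := (want.zip number).foldl
      (fun (d : PySem.Dict String Int) p => d.insert p.1 p.2) PySem.Dict.empty with hneed
  have hnodup : need.keys.Nodup := by
    rw [hneed]
    exact PySem.Dict.nodup_keys_foldl_insert_key (want.zip number) Prod.fst (fun _ p => p.2)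
      PySem.Dict.empty (by simp)
  have hkeys : need.keys = PySem.Set.ofList want := by
    rw [hneed]
    rw [PySem.Dict.keys_foldl_insert_key (want.zip number) Prod.fst (fun _ p => p.2) PySem.Dict.empty]
    rw [List.map_fst_zip h]
    simp [PySem.Set.update_nil_left]
  rw [PySem.List.foldl_count_if
      (fun i => want.all (fun j =>
        ((PySem.List.count (PySem.List.slice discount (some i) (some (i + 10))) j : Int)
          == need.getD j 0)))
      (PySem.List.pyRange 0 ((discount.length : Int) - 10 + 1) 1) 0]
  have hcond : ∀ (s : Nat), s + 10 ≤ discount.length →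
      (want.all (fun j =>
        ((PySem.List.count (PySem.List.slice discount (some (s : Int)) (some ((s : Int) + 10))) j : Int)
          == need.getD j 0))) = goodB need discount s := by
    intro s hs
    have hslice : PySem.List.slice discount (some (s : Int)) (some ((s : Int) + 10))
        = (discount.drop s).take 10 := by
      have := PySem.List.slice_natCast_add discount s 10
      rw [← this]
      norm_num
    rw [Bool.eq_iff_iff]
    unfold goodB
    rw [List.all_eq_true, List.all_eq_true]
    constructor
    · intro hA k hk
      have hkw : k ∈ want := by
        rw [hkeys] at hk
        exact (PySem.Set.mem_ofList want k).1 hk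
      have := hA k hkw
      rwa [hslice, PySem.List.count_eq] at this
    · intro hB j hj
      have hjk : j ∈ need.keys := by
        rw [hkeys]
        exact (PySem.Set.mem_ofList want j).2 hj
      have := hB j hjk
      unfold Wc at this
      rwa [hslice, PySem.List.count_eq]
  by_cases hL : discount.length < 10
  · rw [if_pos hL]
    rw [PySem.List.pyRange_one_eq_nil (by omega : (discount.length : Int) - 10 + 1 ≤ 0)]
    simp
  · rw [if_neg hL]
    push_neg at hL
    set cnt0 := need.keys.foldl (fun (d : PySem.Dict String Int) k => d.insert k 0) PySem.Dict.empty with hcnt0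
    set cnt1 := (PySem.List.slice discount none (some 10)).foldl
        (fun (d : PySem.Dict String Int) item =>
          if d.contains item then d.insert item (d.getD item 0 + 1) else d) cnt0 with hcnt1
    have hcnt0items : cnt0.items = need.keys.map (fun k => (k, (0 : Int))) := by
      rw [hcnt0]
      have := PySem.Dict.items_foldl_insert_fresh need.keys (fun k => k)
        (fun _ => (0 : Int)) PySem.Dict.empty (by intro a _; simp) (by simpa using hnodup)
      simpa using this
    have hcnt1items : cnt1.items = need.keys.map (fun k => (k, Wc discount 0 k)) := by
      rw [hcnt1]
      have hfill := fill_spec need hnodup (PySem.List.slice discount none (some 10)) cnt0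
        (fun _ => (0 : Int)) hcnt0items
      rw [hfill]
      apply List.map_congr_left
      intro k _
      have hsl : PySem.List.slice discount none (some (10 : Int)) = discount.take 10 := by
        have := PySem.List.slice_to (xs := discount) (b := (10 : Int)) (by norm_num)
        rw [this]
        rfl
      rw [hsl]
      unfold Wc
      simp
    have hcnt1nodup : cnt1.keys.Nodup := by
      show (cnt1.items.map Prod.fst).Nodup
      rw [hcnt1items]
      simpa [List.map_map, Function.comp_def] using hnodup
    set matches0 := need.keys.foldl
        (fun (m : Int) k => if cnt1.getD k 0 == need.getD k 0 then m + 1 else m) 0 with hmatches0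
    have hm0 : matches0 = (need.keys.countP (fun k => Wc discount 0 k == need.getD k 0) : Int) := by
      rw [hmatches0, PySem.List.foldl_count_if (fun k => cnt1.getD k 0 == need.getD k 0) need.keys 0]
      rw [zero_add]
      congr 1
      apply List.countP_congr
      intro k hk
      have : cnt1.getD k 0 = Wc discount 0 k :=
        PySem.Dict.getD_of_mem_items cnt1 (by rw [hcnt1items]; exact List.mem_map_of_mem hk)
          hcnt1nodup 0
      rw [this]
    have ha0 : (if matches0 == (need.size : Int) then (1 : Int) else 0)
        = (((List.range 1).countP (fun s => goodB need discount s)) : Int) := by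
      have hg : ((matches0 == (need.size : Int)) : Bool) = goodB need discount 0 := by
        rw [hm0, Bool.eq_iff_iff]
        unfold goodB
        rw [beq_iff_eq, size_keys, Nat.cast_inj, List.all_eq_true]
        constructor
        · intro hlen k hk
          exact List.countP_eq_length.1 hlen k hk
        · intro hall
          exact List.countP_eq_length.2 hall
      rw [hg]
      rcases Bool.eq_false_or_eq_true (goodB need discount 0) with hgg | hgg <;>
        simp [hgg, List.countP_cons]
    have hloop := slide_loop need hnodup discount ((cnt1, matches0),
        (if matches0 == (need.size : Int) then (1 : Int) else 0))
      hcnt1items hm0 ha0 (discount.length - 10) (by omega)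
    rw [show ((discount.length : Int) - 10 + 1) = (((discount.length - 10 + 1 : Nat)) : Int) from by push_cast; omega,
        PySem.List.pyRange_zero_natCast (discount.length - 10 + 1), List.countP_map, zero_add]
    rw [show ((discount.length : Int)) = ((10 + (discount.length - 10) : Nat) : Int) from by push_cast; omega]
    rw [hloop.2.2]
    congr 1
    apply List.countP_congr
    intro s hs
    rw [List.mem_range] at hs
    simp only [Function.comp_def]
    rw [hcond s (by omega)]
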